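-- pv_equiv track=rewrite | github.com/sonjuhyeon/programmers_coding_test | 프로그래머스/2/86052. 빛의 경로 사이클/빛의 경로 사이클.py | solution
-- ===== SOURCE A (Python) =====
-- def get_next_position(grid, cur_pos, cur_dir):
--     row_len = len(grid)
--     col_len = len(grid[0])
--     row = cur_pos[0] # 현재 row 위치
--     col = cur_pos[1] # 현재 col 위치
--
--     if cur_dir == 'R':
--         col = (col + 1) % col_len
--     elif cur_dir == 'L':
--         col = (col - 1) % col_len
--     elif cur_dir == 'U':
--         row = (row - 1) % row_len
--     elif cur_dir == 'D':
--         row = (row + 1) % row_len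
--
--     return [row, col]
--
-- def get_next_direction(grid, cur_pos, cur_dir):
--     node = grid[cur_pos[0]][cur_pos[1]]
--
--     if node == 'S':
--         return cur_dir
--
--     direction_map = {
--         'R': {
--             'R': 'D',
--             'L': 'U',
--             'U': 'R',
--             'D': 'L'
--         },
--         'L': {
--             'R': 'U',
--             'L': 'D',
--             'U': 'L',
--             'D': 'R'
--         }
--     }
--     return direction_map[node][cur_dir]
--
-- def solution(grid):
--     grid = [list(gr) for gr in grid]
--     row_len = len(grid)
--     col_len = len(grid[0])
--
--     # 방문 배열: visited[row][col][dir_index]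
--     visited = [[[False] * 4 for _ in range(col_len)] for _ in range(row_len)]
--
--     directions = ['R', 'D', 'L', 'U']
--     dir_idx = {'R': 0, 'D': 1, 'L': 2, 'U': 3}
--
--     answer = []
--
--     for r in range(row_len):
--         for c in range(col_len):
--             for d in directions:
--                 if not visited[r][c][dir_idx[d]]:
--                     cur_pos = [r, c]
--                     cur_dir = d
--                     path_len = 0
--
--                     # 사이클 추적
--                     while not visited[cur_pos[0]][cur_pos[1]][dir_idx[cur_dir]]:
--                         visited[cur_pos[0]][cur_pos[1]][dir_idx[cur_dir]] = True
--                         cur_pos = get_next_position(grid, cur_pos, cur_dir)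
--                         cur_dir = get_next_direction(grid, cur_pos, cur_dir)
--                         path_len += 1
--
--                     answer.append(path_len)
--
--     return sorted(answer)
-- ===== SOURCE B (Python) =====
-- def solution(grid):
--     R, C = len(grid), len(grid[0])
--     n = R * C * 4
--     refl = {'L': (3, 0, 1, 2), 'R': (1, 2, 3, 0)}
--
--     def step(i):
--         cell, d = divmod(i, 4)
--         r, c = divmod(cell, C)
--         if d == 0:
--             c = (c + 1) % C
--         elif d == 1:
--             r = (r + 1) % R
--         elif d == 2:
--             c = (c - 1) % C
--         else:
--             r = (r - 1) % R
--         ch = grid[r][c]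
--         nd = d if ch == 'S' else refl[ch][d]
--         return (r * C + c) * 4 + nd
--
--     # cycle-leader: the transition is a permutation of the n states, so every
--     # state lies on a cycle; count each cycle once, at its minimal state, by
--     # pure iteration -- no visited structure at all.
--     lengths = []
--     for i in range(n):
--         j = step(i)
--         t = 1
--         while j > i:
--             j = step(j)
--             t += 1
--         if j == i:
--             lengths.append(t)
--     return sorted(lengths)
-- ===== Notes on version B (the rewrite author's own statement) =====
-- stated objective: alternative
-- what changed: B drops A's visited-marking traversal entirely and uses the stateless cycle-leader algorithm on the integer-encoded (cell,direction) permutation: from every state it purely iterates the transition function, counting a cycle exactly when the walk returns to its start before reaching any smaller state, so no visited structure exists at all.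
import Mathlib
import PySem

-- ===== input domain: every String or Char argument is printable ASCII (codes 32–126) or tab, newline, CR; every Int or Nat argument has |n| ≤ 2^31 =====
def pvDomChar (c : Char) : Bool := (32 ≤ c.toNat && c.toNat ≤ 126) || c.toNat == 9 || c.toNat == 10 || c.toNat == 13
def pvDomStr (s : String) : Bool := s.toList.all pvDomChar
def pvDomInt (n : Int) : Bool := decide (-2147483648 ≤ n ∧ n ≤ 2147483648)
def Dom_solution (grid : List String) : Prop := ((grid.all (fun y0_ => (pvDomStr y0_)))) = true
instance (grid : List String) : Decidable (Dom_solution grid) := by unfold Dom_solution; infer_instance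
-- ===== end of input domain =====

-- B replaces A's visited-marking traversal by the stateless cycle-leader
-- algorithm on the integer-encoded state permutation: each cycle is counted
-- once, at its minimal state, by pure iteration of the transition function
-- (alternative algorithm, no visited structure; same return value).

-- ===== PORT A =====
-- Indices into the visited structure and the grid are produced by `range` and by
-- `%` with a positive divisor, hence nonnegative and (under Pre_) in range, so
-- `Int.toNat` + `List.getD` is value-faithful to Python's list indexing here.
def getNextPosition (g : List (List Char)) (pos : Int × Int) (d : Char) : Int × Int :=
  let rowLen : Int := g.length
  let colLen : Int := (g.headD []).length
  let row := pos.1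
  let col := pos.2
  if d = 'R' then (row, PySem.Int.mod (col + 1) colLen)
  else if d = 'L' then (row, PySem.Int.mod (col - 1) colLen)
  else if d = 'U' then (PySem.Int.mod (row - 1) rowLen, col)
  else if d = 'D' then (PySem.Int.mod (row + 1) rowLen, col)
  else (row, col)

-- `direction_map[node][cur_dir]` raises KeyError unless node ∈ {'S','L','R'}; Pre_ excludes that.
def getNextDirection (g : List (List Char)) (pos : Int × Int) (d : Char) : Char :=
  let node := (g.getD pos.1.toNat []).getD pos.2.toNat ' '
  if node = 'S' then d
  else if node = 'R' then
    (if d = 'R' then 'D' else if d = 'L' then 'U' else if d = 'U' then 'R'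
     else if d = 'D' then 'L' else d)
  else if node = 'L' then
    (if d = 'R' then 'U' else if d = 'L' then 'D' else if d = 'U' then 'L'
     else if d = 'D' then 'R' else d)
  else d

def dirIdxA (d : Char) : Nat :=
  if d = 'R' then 0 else if d = 'D' then 1 else if d = 'L' then 2 else 3

def visGet (v : List (List (List Bool))) (r c k : Nat) : Bool :=
  ((v.getD r []).getD c []).getD k false

def visSet (v : List (List (List Bool))) (r c k : Nat) : List (List (List Bool)) :=
  v.modify r (fun row => row.modify c (fun cell => cell.set k true))

-- the `while not visited[...]` loop; fuel n+1 (one more than the number of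
-- states) only makes the recursion structurally total, it is never exhausted
def runA (g : List (List Char)) : Nat → List (List (List Bool)) → (Int × Int) → Char → Int →
    List (List (List Bool)) × Int
  | 0, vis, _, _, pl => (vis, pl)
  | fuel + 1, vis, pos, d, pl =>
    if visGet vis pos.1.toNat pos.2.toNat (dirIdxA d) then (vis, pl)
    else
      let vis' := visSet vis pos.1.toNat pos.2.toNat (dirIdxA d)
      let pos' := getNextPosition g pos d
      let d' := getNextDirection g pos' d
      runA g fuel vis' pos' d' (pl + 1)

def solution (grid : List String) : List Int :=
  let g := grid.map (·.toList)
  let rowLen := g.length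
  let colLen := (g.headD []).length
  let vis0 := List.replicate rowLen (List.replicate colLen (List.replicate 4 false))
  let fuel := rowLen * colLen * 4 + 1
  let st :=
    (PySem.List.pyRange 0 rowLen 1).foldl (fun st r =>
      (PySem.List.pyRange 0 colLen 1).foldl (fun st c =>
        (['R', 'D', 'L', 'U']).foldl (fun st d =>
          if visGet st.1 r.toNat c.toNat (dirIdxA d) then st
          else
            let res := runA g fuel st.1 (r, c) d 0
            (res.1, st.2 ++ [res.2])) st) st)
      ((vis0, ([] : List Int)))
  PySem.List.sorted st.2 (fun x => x) false

-- ===== PORT B =====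
-- `step(i)`: successor of encoded state i = (r*C+c)*4 + d over grid g (R rows, C cols)
def stepB (g : List (List Char)) (Rn Cn : Int) (i : Int) : Int :=
  let cell := PySem.Int.floordiv i 4
  let d := PySem.Int.mod i 4
  let r0 := PySem.Int.floordiv cell Cn
  let c0 := PySem.Int.mod cell Cn
  let rc : Int × Int :=
    if d = 0 then (r0, PySem.Int.mod (c0 + 1) Cn)
    else if d = 1 then (PySem.Int.mod (r0 + 1) Rn, c0)
    else if d = 2 then (r0, PySem.Int.mod (c0 - 1) Cn)
    else (PySem.Int.mod (r0 - 1) Rn, c0)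
  let ch := (g.getD rc.1.toNat []).getD rc.2.toNat ' '
  let refl : Int := if ch = 'S' then d
    else if ch = 'L' then (if d = 0 then 3 else if d = 1 then 0 else if d = 2 then 1 else 2)
    else (if d = 0 then 1 else if d = 1 then 2 else if d = 2 then 3 else 0)
  (rc.1 * Cn + rc.2) * 4 + refl

-- the `while j > i` loop; fuel n+1 only makes the recursion structurally total
-- (under Pre_ the walk returns to ≤ i within one cycle, so it is never exhausted)
def walkB (stp : Int → Int) (i : Int) : Nat → Int → Int → Int × Int
  | 0, j, t => (j, t)
  | fuel + 1, j, t => if i < j then walkB stp i fuel (stp j) (t + 1) else (j, t)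

def solution_alt (grid : List String) : List Int :=
  let g := grid.map (·.toList)
  let Rn : Int := g.length
  let Cn : Int := (g.headD []).length
  let n : Int := Rn * Cn * 4
  let fuel := Rn.toNat * Cn.toNat * 4 + 1
  let lengths := (PySem.List.pyRange 0 n 1).foldl (fun acc i =>
    let w := walkB (stepB g Rn Cn) i fuel (stepB g Rn Cn i) 1
    if w.1 = i then acc ++ [w.2] else acc) ([] : List Int)
  PySem.List.sorted lengths (fun x => x) false

-- ===== PRECONDITION & SPEC =====
-- Pre_ is exactly where A returns: a nonempty grid whose rows all reach the first
-- row's length, with only 'S'/'L'/'R' in the first len(grid[0]) columns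
-- (otherwise A raises IndexError resp. KeyError).
def Pre_solution (grid : List String) : Prop :=
  grid ≠ [] ∧ ∀ s ∈ grid,
    (grid.headD "").toList.length ≤ s.toList.length ∧
    ∀ j < (grid.headD "").toList.length,
      s.toList.getD j ' ' = 'S' ∨ s.toList.getD j ' ' = 'L' ∨ s.toList.getD j ' ' = 'R'

instance (grid : List String) : Decidable (Pre_solution grid) := by
  unfold Pre_solution; infer_instance

def pvWitness_solution : List String := ["SL", "RS"]

def Spec_solution (grid : List String) (out : List Int) : Prop := out = solution_alt grid
instance (grid : List String) (out : List Int) : Decidable (Spec_solution grid out) := by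
  unfold Spec_solution; infer_instance

-- ===== CLAIM (what is proved, stated in full; the proofs are below) =====
def Claim_equal_solution : Prop :=
  ∀ (grid : List String), Dom_solution grid → Pre_solution grid → Spec_solution grid (solution grid)

-- ===== LEMMAS AND PROOFS =====

-- proof-only helper definitions

def dirChar (k : Nat) : Char :=
  if k = 0 then 'R' else if k = 1 then 'D' else if k = 2 then 'L' else 'U'

def encN (C r c k : Nat) : Nat := (r * C + c) * 4 + k

def mk3 (R C : Nat) (f : Nat → Bool) : List (List (List Bool)) :=
  (List.range R).map (fun r => (List.range C).map (fun c =>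
    (List.range 4).map (fun k => f (encN C r c k))))

def nodeAt (g : List (List Char)) (r c : Nat) : Char := (g.getD r []).getD c ' '

def Good (g : List (List Char)) (R C : Nat) : Prop :=
  ∀ r < R, ∀ c < C, nodeAt g r c = 'S' ∨ nodeAt g r c = 'L' ∨ nodeAt g r c = 'R'

def nposN (R C r c k : Nat) : Nat × Nat :=
  if k = 0 then (r, (c + 1) % C)
  else if k = 1 then ((r + 1) % R, c)
  else if k = 2 then (r, (c + C - 1) % C)
  else ((r + R - 1) % R, c)

def ndirN' (node : Char) (k : Nat) : Nat :=
  if node = 'S' then k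
  else if node = 'L' then (if k = 0 then 3 else if k = 1 then 0 else if k = 2 then 1 else 2)
  else (if k = 0 then 1 else if k = 1 then 2 else if k = 2 then 3 else 0)

def ndirN (g : List (List Char)) (r c k : Nat) : Nat := ndirN' (nodeAt g r c) k

-- the transition function on encoded states (pure Nat form)
def fN (g : List (List Char)) (R C : Nat) (e : Nat) : Nat :=
  let k := e % 4
  let cell := e / 4
  let r := cell / C
  let c := cell % C
  let p := nposN R C r c k
  encN C p.1 p.2 (ndirN g p.1 p.2 k)

-- classical decide (proof-side only)
noncomputable def cdec (p : Prop) : Bool := @decide p (Classical.propDecidable p)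

-- abstract walks and folds (proof-side mirrors of the two loops)
noncomputable def walkA (f : Nat → Nat) : Nat → (Nat → Bool) → Nat → Int → (Nat → Bool) × Int
  | 0, g, _, len => (g, len)
  | fuel + 1, g, s, len =>
    if g s then (g, len) else walkA f fuel (Function.update g s true) (f s) (len + 1)

noncomputable def stepAabs (f : Nat → Nat) (fuel : Nat)
    (st : (Nat → Bool) × List Int) (e : Nat) : (Nat → Bool) × List Int :=
  if st.1 e then st else ((walkA f fuel st.1 e 0).1, st.2 ++ [(walkA f fuel st.1 e 0).2])

def wB (f : Nat → Nat) (i : Nat) : Nat → Nat → Int → Nat × Int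
  | 0, j, t => (j, t)
  | fuel + 1, j, t => if i < j then wB f i fuel (f j) (t + 1) else (j, t)

def stepBabs (f : Nat → Nat) (fuel : Nat) (acc : List Int) (i : Nat) : List Int :=
  if (wB f i fuel (f i) 1).1 = i then acc ++ [(wB f i fuel (f i) 1).2] else acc

noncomputable def Vfun (f : Nat → Nat) (i e : Nat) : Bool := cdec (∃ k, f^[k] e < i)

-- small facts

theorem cdec_true_iff (p : Prop) : cdec p = true ↔ p := by simp [cdec]

theorem bool_eq_of_iff {a b : Bool} (h : (a = true) ↔ (b = true)) : a = b := by
  cases a <;> cases b <;> simp_all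

theorem cdec_false_iff (p : Prop) : cdec p = false ↔ ¬ p := by simp [cdec]

theorem dirIdxA_dirChar {k : Nat} (hk : k < 4) : dirIdxA (dirChar k) = k := by
  interval_cases k <;> rfl

theorem npos_lt {R C r c k : Nat} (hr : r < R) (hc : c < C) :
    (nposN R C r c k).1 < R ∧ (nposN R C r c k).2 < C := by
  have hR : 0 < R := by omega
  unfold nposN
  split_ifs <;> exact ⟨by first | exact hr | exact Nat.mod_lt _ (by omega),
                       by first | exact hc | exact Nat.mod_lt _ (by omega)⟩

theorem ndir_lt {g : List (List Char)} {r c k : Nat} (hk : k < 4) : ndirN g r c k < 4 := by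
  unfold ndirN ndirN'; split_ifs <;> omega

theorem encN_lt {R C r c k : Nat} (hr : r < R) (hc : c < C) (hk : k < 4) :
    encN C r c k < R * C * 4 := by
  have h1 : r * C + c < R * C := by
    calc r * C + c < r * C + C := by omega
    _ = (r + 1) * C := by ring
    _ ≤ R * C := Nat.mul_le_mul_right _ (by omega)
  unfold encN; omega

theorem encN_inj {R C r c k r' c' k' : Nat} (_hr : r < R) (hc : c < C) (hk : k < 4)
    (hr' : r' < R) (hc' : c' < C) (hk' : k' < 4)
    (h : encN C r c k = encN C r' c' k') : r = r' ∧ c = c' ∧ k = k' := by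
  unfold encN at h
  have h1 : r * C + c = r' * C + c' ∧ k = k' := by omega
  have h2 : r = r' := by
    rcases Nat.lt_trichotomy r r' with hlt | heq | hgt
    · have : (r + 1) * C ≤ r' * C := Nat.mul_le_mul_right _ (by omega)
      nlinarith [h1.1]
    · exact heq
    · have : (r' + 1) * C ≤ r * C := Nat.mul_le_mul_right _ (by omega)
      nlinarith [h1.1]
  refine ⟨h2, ?_, h1.2⟩
  subst h2; omega

theorem enc_decomp {R C e : Nat} (he : e < R * C * 4) :
    e = encN C (e / 4 / C) (e / 4 % C) (e % 4) ∧
    e / 4 / C < R ∧ e / 4 % C < C ∧ e % 4 < 4 := by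
  have hC : 0 < C := by by_contra h; simp [Nat.eq_zero_of_not_pos h] at he
  have hq : e / 4 < R * C := by omega
  have hrr : e / 4 / C < R := Nat.div_lt_of_lt_mul (by rw [Nat.mul_comm] at hq; omega)
  refine ⟨?_, hrr, Nat.mod_lt _ hC, Nat.mod_lt _ (by omega)⟩
  unfold encN
  have := Nat.div_add_mod (e / 4) C
  have := Nat.div_add_mod e 4
  nlinarith

-- modular-arithmetic bridges between the Int ports and the Nat abstraction

theorem mod_incr (c C : Nat) : PySem.Int.mod ((c : Int) + 1) (C : Int) = (((c + 1) % C : Nat) : Int) := by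
  have := PySem.Int.mod_natCast (c + 1) C
  push_cast at this ⊢; exact this

theorem mod_decr (c C : Nat) (hC : 0 < C) :
    PySem.Int.mod ((c : Int) - 1) (C : Int) = (((c + C - 1) % C : Nat) : Int) := by
  rw [PySem.Int.mod_eq_emod_of_pos (by exact_mod_cast hC)]
  have h : ((c : Int) - 1) = ((c + C - 1 : Nat) : Int) - (C : Nat) := by omega
  rw [h, Int.sub_emod_right]
  push_cast
  ring

theorem mod_succ_inj {C a b : Nat} (ha : a < C) (hb : b < C)
    (h : (a + 1) % C = (b + 1) % C) : a = b := by
  have h1 : (a + 1) % C = if a + 1 = C then 0 else a + 1 := by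
    split_ifs with hh
    · simp [hh]
    · exact Nat.mod_eq_of_lt (by omega)
  have h2 : (b + 1) % C = if b + 1 = C then 0 else b + 1 := by
    split_ifs with hh
    · simp [hh]
    · exact Nat.mod_eq_of_lt (by omega)
  rw [h1, h2] at h
  split_ifs at h <;> omega

theorem mod_pred_inj {C a b : Nat} (ha : a < C) (hb : b < C)
    (h : (a + C - 1) % C = (b + C - 1) % C) : a = b := by
  have h1 : ∀ x, x < C → (x + C - 1) % C = if x = 0 then C - 1 else x - 1 := by
    intro x hx
    split_ifs with hh
    · subst hh
      have h0 : 0 + C - 1 = C - 1 := by omega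
      rw [h0]
      exact Nat.mod_eq_of_lt (by omega)
    · have hx : x + C - 1 = C + (x - 1) := by omega
      rw [hx, Nat.add_mod_left]
      exact Nat.mod_eq_of_lt (by omega)
  rw [h1 a ha, h1 b hb] at h
  split_ifs at h <;> omega

theorem npos_inj {R C r1 c1 r2 c2 k : Nat} (hk : k < 4) (hr1 : r1 < R) (hc1 : c1 < C)
    (hr2 : r2 < R) (hc2 : c2 < C) (h : nposN R C r1 c1 k = nposN R C r2 c2 k) :
    r1 = r2 ∧ c1 = c2 := by
  interval_cases k
  · unfold nposN at h; norm_num [Prod.mk.injEq] at h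
    exact ⟨h.1, mod_succ_inj hc1 hc2 h.2⟩
  · unfold nposN at h; norm_num [Prod.mk.injEq] at h
    exact ⟨mod_succ_inj hr1 hr2 h.1, h.2⟩
  · unfold nposN at h; norm_num [Prod.mk.injEq] at h
    exact ⟨h.1, mod_pred_inj hc1 hc2 h.2⟩
  · unfold nposN at h; norm_num [Prod.mk.injEq] at h
    exact ⟨mod_pred_inj hr1 hr2 h.1, h.2⟩

theorem ndir'_inj {node : Char} {k1 k2 : Nat} (h1 : k1 < 4) (h2 : k2 < 4)
    (h : ndirN' node k1 = ndirN' node k2) : k1 = k2 := by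
  unfold ndirN' at h
  split_ifs at h <;> omega

-- fN on encoded states

theorem fN_enc {g : List (List Char)} {R C r c k : Nat} (hr : r < R) (hc : c < C) (hk : k < 4) :
    fN g R C (encN C r c k) =
      encN C (nposN R C r c k).1 (nposN R C r c k).2
        (ndirN g (nposN R C r c k).1 (nposN R C r c k).2 k) := by
  have hC : 0 < C := by omega
  have h2 : encN C r c k % 4 = k := by unfold encN; omega
  have h1 : encN C r c k / 4 = r * C + c := by unfold encN; omega
  have h3 : (r * C + c) / C = r := by
    rw [Nat.mul_comm, Nat.mul_add_div hC, Nat.div_eq_of_lt hc]; omega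
  have h4 : (r * C + c) % C = c := by
    rw [Nat.mul_comm, Nat.mul_add_mod, Nat.mod_eq_of_lt hc]
  unfold fN
  simp only [h1, h2, h3, h4]

theorem fN_lt {g : List (List Char)} {R C e : Nat} (he : e < R * C * 4) :
    fN g R C e < R * C * 4 := by
  obtain ⟨hdec, hr, hc, hk⟩ := enc_decomp (R := R) he
  rw [hdec, fN_enc hr hc hk]
  exact encN_lt (npos_lt hr hc).1 (npos_lt hr hc).2 (ndir_lt hk)

theorem fN_inj {g : List (List Char)} {R C a b : Nat} (ha : a < R * C * 4) (hb : b < R * C * 4)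
    (h : fN g R C a = fN g R C b) : a = b := by
  obtain ⟨hda, har, hac, hak⟩ := enc_decomp (R := R) ha
  obtain ⟨hdb, hbr, hbc, hbk⟩ := enc_decomp (R := R) hb
  rw [hda, fN_enc har hac hak, hdb, fN_enc hbr hbc hbk] at h
  obtain ⟨hp1, hp2, hkk⟩ := encN_inj (npos_lt har hac).1 (npos_lt har hac).2
    (ndir_lt hak) (npos_lt hbr hbc).1 (npos_lt hbr hbc).2 (ndir_lt hbk) h
  have hpos : nposN R C (a / 4 / C) (a / 4 % C) (a % 4) =
      nposN R C (b / 4 / C) (b / 4 % C) (b % 4) := Prod.ext hp1 hp2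
  have hk : a % 4 = b % 4 := by
    have := hkk
    rw [hpos] at this  -- same cell, same node
    unfold ndirN at this
    exact ndir'_inj hak hbk this
  rw [hk] at hpos
  obtain ⟨hr, hc⟩ := npos_inj hbk har hac hbr hbc hpos
  rw [hda, hdb, hr, hc, hk]

-- visited-array representation lemmas

theorem mk3_false (R C : Nat) :
    mk3 R C (fun _ => false) = List.replicate R (List.replicate C (List.replicate 4 false)) := by
  unfold mk3
  simp [List.map_const']

theorem visGet_mk3 {R C r c k : Nat} (f : Nat → Bool) (hr : r < R) (hc : c < C) (hk : k < 4) :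
    visGet (mk3 R C f) r c k = f (encN C r c k) := by
  unfold visGet mk3
  rw [PySem.List.getD_map_range _ _ _ _ hr]
  rw [PySem.List.getD_map_range _ _ _ _ hc]
  rw [PySem.List.getD_map_range _ _ _ _ hk]

theorem map_range_modify {α : Type} (R r : Nat) (h : Nat → α) (g : α → α) :
    ((List.range R).map h).modify r g =
      (List.range R).map (fun i => if i = r then g (h i) else h i) := by
  apply List.ext_getElem
  · simp [List.length_modify]
  intro i hi1 hi2
  rw [List.getElem_modify]
  by_cases hir : i = r
  · subst hir; simp
  · simp [hir, Ne.symm hir]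

theorem map_range_set {α : Type} (R r : Nat) (h : Nat → α) (x : α) :
    ((List.range R).map h).set r x =
      (List.range R).map (fun i => if i = r then x else h i) := by
  apply List.ext_getElem
  · simp
  intro i hi1 hi2
  rw [List.getElem_set]
  by_cases hir : i = r
  · subst hir; simp
  · simp [hir, Ne.symm hir]

theorem visSet_mk3 {R C r c k : Nat} (f : Nat → Bool) (hr : r < R) (hc : c < C) (hk : k < 4) :
    visSet (mk3 R C f) r c k = mk3 R C (Function.update f (encN C r c k) true) := by
  unfold visSet mk3
  rw [map_range_modify]
  apply List.map_congr_left
  intro i hiR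
  rw [List.mem_range] at hiR
  by_cases hir : i = r
  · subst hir
    rw [if_pos rfl, map_range_modify]
    apply List.map_congr_left
    intro j hjC
    rw [List.mem_range] at hjC
    by_cases hjc : j = c
    · subst hjc
      rw [if_pos rfl, map_range_set]
      apply List.map_congr_left
      intro m hm4
      rw [List.mem_range] at hm4
      by_cases hmk : m = k
      · subst hmk; simp [Function.update]
      · have : encN C i j m ≠ encN C i j k := fun h =>
          hmk (encN_inj hiR hjC hm4 hiR hjC hk h).2.2
        simp [hmk, Function.update, this]
    · rw [if_neg hjc]
      apply List.map_congr_left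
      intro m hm4
      rw [List.mem_range] at hm4
      have : encN C i j m ≠ encN C i c k := fun h =>
        hjc (encN_inj hiR hjC hm4 hiR hc hk h).2.1
      simp [Function.update, this]
  · rw [if_neg hir]
    apply List.map_congr_left
    intro j hjC
    rw [List.mem_range] at hjC
    apply List.map_congr_left
    intro m hm4
    rw [List.mem_range] at hm4
    have : encN C i j m ≠ encN C r c k := fun h =>
      hir (encN_inj hiR hjC hm4 hr hc hk h).1
    simp [Function.update, this]

-- next-state correspondence between port A, port B and fN

theorem A_next_pos {g : List (List Char)} {R C r c k : Nat}
    (hg : g.length = R) (hg0 : (g.headD []).length = C)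
    (hr : r < R) (hc : c < C) (hk : k < 4) :
    getNextPosition g ((r : Int), (c : Int)) (dirChar k) =
      (((nposN R C r c k).1 : Int), ((nposN R C r c k).2 : Int)) := by
  have hR : 0 < R := by omega
  have hC : 0 < C := by omega
  have hg0' : (g.head?.getD []).length = C := by simpa using hg0
  have mi := mod_incr c C
  have md := mod_decr c C hC
  have mi' := mod_incr r R
  have md' := mod_decr r R hR
  interval_cases k <;>
    simp [getNextPosition, dirChar, nposN, hg, hg0', mi, md, mi', md']

theorem A_next_dir {g : List (List Char)} {R C r c k : Nat}
    (good : Good g R C) (hr : r < R) (hc : c < C) (hk : k < 4) :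
    getNextDirection g ((r : Int), (c : Int)) (dirChar k) = dirChar (ndirN g r c k) := by
  have hnode := good r hr c hc
  unfold getNextDirection ndirN ndirN'
  simp only [Int.toNat_natCast, nodeAt] at hnode ⊢
  rcases hnode with h | h | h <;> simp only [List.getD_eq_getElem?_getD] at h <;>
    interval_cases k <;> simp [h, dirChar]

theorem B_step {g : List (List Char)} {R C r c k : Nat}
    (hr : r < R) (hc : c < C) (hk : k < 4) :
    stepB g (R : Int) (C : Int) ((encN C r c k : Nat) : Int) =
      ((encN C (nposN R C r c k).1 (nposN R C r c k).2
          (ndirN g (nposN R C r c k).1 (nposN R C r c k).2 k) : Nat) : Int) := by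
  have hR : 0 < R := by omega
  have hC : 0 < C := by omega
  have h1 : encN C r c k / 4 = r * C + c := by unfold encN; omega
  have h2 : encN C r c k % 4 = k := by unfold encN; omega
  have h3 : (r * C + c) / C = r := by
    rw [Nat.mul_comm, Nat.mul_add_div hC, Nat.div_eq_of_lt hc]; omega
  have h4 : (r * C + c) % C = c := by
    rw [Nat.mul_comm, Nat.mul_add_mod, Nat.mod_eq_of_lt hc]
  have f1 : PySem.Int.floordiv ((encN C r c k : Nat) : Int) 4 = ((r * C + c : Nat) : Int) := by
    rw [show ((4 : Int)) = ((4 : Nat) : Int) by norm_cast, PySem.Int.floordiv_natCast, h1]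
  have m1 : PySem.Int.mod ((encN C r c k : Nat) : Int) 4 = ((k : Nat) : Int) := by
    rw [show ((4 : Int)) = ((4 : Nat) : Int) by norm_cast, PySem.Int.mod_natCast, h2]
  have f2 : PySem.Int.floordiv ((r * C + c : Nat) : Int) (C : Int) = ((r : Nat) : Int) := by
    rw [PySem.Int.floordiv_natCast, h3]
  have m2 : PySem.Int.mod ((r * C + c : Nat) : Int) (C : Int) = ((c : Nat) : Int) := by
    rw [PySem.Int.mod_natCast, h4]
  have mi := mod_incr c C
  have md := mod_decr c C hC
  have mi' := mod_incr r R
  have md' := mod_decr r R hR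
  have J3 : (((c + C - 1 : Nat) : Int) % (C : Int)).toNat = (c + C - 1) % C := by
    have h : ((c + C - 1 : Nat) : Int) % (C : Int) = (((c + C - 1) % C : Nat) : Int) := by
      push_cast; ring
    rw [h, Int.toNat_natCast]
  have J4 : (((r + R - 1 : Nat) : Int) % (R : Int)).toNat = (r + R - 1) % R := by
    have h : ((r + R - 1 : Nat) : Int) % (R : Int) = (((r + R - 1) % R : Nat) : Int) := by
      push_cast; ring
    rw [h, Int.toNat_natCast]
  have J1b : (((c : Int) + 1) % (C : Int)).toNat = (c + 1) % C := by
    have h : ((c : Int) + 1) % (C : Int) = (((c + 1) % C : Nat) : Int) := by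
      push_cast; ring
    rw [h, Int.toNat_natCast]
  have J2b : (((r : Int) + 1) % (R : Int)).toNat = (r + 1) % R := by
    have h : ((r : Int) + 1) % (R : Int) = (((r + 1) % R : Nat) : Int) := by
      push_cast; ring
    rw [h, Int.toNat_natCast]
  simp only [stepB, f1, m1, f2, m2]
  interval_cases k <;>
  · simp only [nposN, ndirN, ndirN', nodeAt, encN, Nat.cast_zero, Nat.cast_one,
      Nat.cast_ofNat]
    norm_num [mi, md, mi', md', Int.toNat_natCast]
    try simp only [J3, J4, J1b, J2b]

-- ===== permutation cycle theory over [0, n) =====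

theorem iter_lt {f : Nat → Nat} {n : Nat} (hf : ∀ e, e < n → f e < n)
    {x : Nat} (hx : x < n) : ∀ k, f^[k] x < n := by
  intro k
  induction k with
  | zero => simpa
  | succ k ih => rw [Function.iterate_succ_apply']; exact hf _ ih

theorem iter_cancel {f : Nat → Nat} {n : Nat} (hf : ∀ e, e < n → f e < n)
    (hinj : ∀ a, a < n → ∀ b, b < n → f a = f b → a = b) :
    ∀ m (x y : Nat), x < n → y < n → f^[m] x = f^[m] y → x = y := by
  intro m
  induction m with
  | zero => simp
  | succ m ih =>
    intro x y hx hy h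
    rw [Function.iterate_succ_apply', Function.iterate_succ_apply'] at h
    exact ih x y hx hy (hinj _ (iter_lt hf hx m) _ (iter_lt hf hy m) h)

theorem exists_period {f : Nat → Nat} {n : Nat} (hf : ∀ e, e < n → f e < n)
    (hinj : ∀ a, a < n → ∀ b, b < n → f a = f b → a = b)
    {i : Nat} (hi : i < n) : ∃ p, 0 < p ∧ p ≤ n ∧ f^[p] i = i := by
  have hlt : ∀ k, f^[k] i < n := iter_lt hf hi
  have maps : ∀ k ∈ Finset.range (n + 1), f^[k] i ∈ Finset.range n := by
    intro k _; exact Finset.mem_range.mpr (hlt k)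
  obtain ⟨a, ha, b, hb, hab, heq⟩ :=
    Finset.exists_ne_map_eq_of_card_lt_of_maps_to (by simp) maps
  rw [Finset.mem_range] at ha hb
  have key : ∀ a b : Nat, a < b → b ≤ n → f^[a] i = f^[b] i → ∃ p, 0 < p ∧ p ≤ n ∧ f^[p] i = i := by
    intro a b hlt' hbn h
    refine ⟨b - a, by omega, by omega, ?_⟩
    have hb' : f^[b] i = f^[a] (f^[b - a] i) := by
      rw [← Function.iterate_add_apply]
      congr 1; omega
    rw [hb'] at h
    exact (iter_cancel hf hinj a i (f^[b - a] i) hi (hlt _) h).symm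
  rcases Nat.lt_or_ge a b with h | h
  · exact key a b h (by omega) heq
  · exact key b a (by omega) (by omega) heq.symm

theorem iter_fix_mul {f : Nat → Nat} {p i : Nat} (hfix : f^[p] i = i) :
    ∀ t, f^[p * t] i = i := by
  intro t
  induction t with
  | zero => simp
  | succ t ih =>
    have : p * (t + 1) = p * t + p := by ring
    rw [this, Function.iterate_add_apply, hfix, ih]

theorem iter_mod {f : Nat → Nat} {p i : Nat} (hp : 0 < p) (hfix : f^[p] i = i) :
    ∀ k, f^[k] i = f^[k % p] i := by
  intro k
  have hdm := Nat.mod_add_div k p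
  conv_lhs => rw [← hdm]
  rw [Function.iterate_add_apply, iter_fix_mul hfix]

theorem orbit_back {f : Nat → Nat} {n : Nat} (hf : ∀ e, e < n → f e < n)
    (hinj : ∀ a, a < n → ∀ b, b < n → f a = f b → a = b)
    {i e P k : Nat} (hi : i < n) (he : e < n) (hP : 0 < P) (hfix : f^[P] i = i)
    (hk : f^[k] e = i) : e = i ∨ ∃ k', 0 < k' ∧ k' < P ∧ f^[k'] i = e := by
  have hPe : f^[P] e = e := by
    have h1 : f^[k] (f^[P] e) = f^[k] e := by
      calc f^[k] (f^[P] e) = f^[k + P] e := (Function.iterate_add_apply f k P e).symm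
        _ = f^[P + k] e := by rw [Nat.add_comm]
        _ = f^[P] (f^[k] e) := Function.iterate_add_apply f P k e
        _ = f^[P] i := by rw [hk]
        _ = i := hfix
        _ = f^[k] e := hk.symm
    exact iter_cancel hf hinj k _ _ (iter_lt hf he P) he h1
  have hmod := Nat.mod_lt k hP
  have hdm := Nat.mod_add_div k P
  obtain ⟨q, hq⟩ : ∃ q, P * (k / P) = q := ⟨_, rfl⟩
  rw [hq] at hdm
  have hsum : (q + P - k) + k = P * (k / P + 1) := by rw [Nat.mul_add, Nat.mul_one, hq]; omega
  have hval : f^[q + P - k] i = e := by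
    rw [← hk, ← Function.iterate_add_apply, hsum]
    exact iter_fix_mul hPe _
  by_cases hEq : q + P - k = P
  · left
    rw [hEq, hfix] at hval
    exact hval.symm
  · right; exact ⟨q + P - k, by omega, by omega, hval⟩

-- ===== the two inner walks characterized =====

theorem walkA_run {f : Nat → Nat} {n : Nat} (hf : ∀ e, e < n → f e < n)
    (hinj : ∀ a, a < n → ∀ b, b < n → f a = f b → a = b)
    {i P : Nat} (hi : i < n) (hP : 0 < P) (hfix : f^[P] i = i)
    (hmin : ∀ t, 0 < t → t < P → f^[t] i ≠ i) :
    ∀ (fuel m : Nat) (g : Nat → Bool) (len : Int), 1 ≤ m → m ≤ P →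
      (∀ k, m ≤ k → k < P → g (f^[k] i) = false) → g i = true → P - m < fuel →
      walkA f fuel g (f^[m] i) len =
        ((fun e => g e || cdec (∃ k, m ≤ k ∧ k < P ∧ f^[k] i = e)),
         len + ((P - m : Nat) : Int)) := by
  intro fuel
  induction fuel with
  | zero => omega
  | succ fuel ih =>
    intro m g len hm1 hmP hg hgi hfuel
    by_cases hmp : m = P
    · subst hmp
      rw [hfix]
      simp only [walkA, hgi, if_true, Prod.mk.injEq]
      refine ⟨?_, ?_⟩
      · funext e
        have : ¬ ∃ k, m ≤ k ∧ k < m ∧ f^[k] i = e := by rintro ⟨k, h1, h2, _⟩; omega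
        rw [(cdec_false_iff _).mpr this]
        simp
      · simp
    · have hmP' : m < P := by omega
      have hgs : g (f^[m] i) = false := hg m (by omega) hmP'
      simp only [walkA, hgs, Bool.false_eq_true, if_false]
      rw [show f (f^[m] i) = f^[m + 1] i from (Function.iterate_succ_apply' f m i).symm]
      have hstep := ih (m + 1) (Function.update g (f^[m] i) true) (len + 1)
        (by omega) (by omega) ?hg' ?hgi' (by omega)
      case hg' =>
        intro k hk1 hk2
        have hne : f^[k] i ≠ f^[m] i := by
          intro hEq
          have : f^[k - m] i = i :=
            iter_cancel hf hinj m _ _ (iter_lt hf hi _) hi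
              (by rw [← Function.iterate_add_apply, show m + (k - m) = k by omega]; exact hEq)
          exact hmin (k - m) (by omega) (by omega) this
        rw [Function.update_of_ne hne]
        exact hg k (by omega) hk2
      case hgi' =>
        have hne : i ≠ f^[m] i := fun hEq => hmin m (by omega) hmP' hEq.symm
        rw [Function.update_of_ne hne]
        exact hgi
      rw [hstep]
      simp only [Prod.mk.injEq]
      refine ⟨?_, ?_⟩
      · funext e
        by_cases hEq : e = f^[m] i
        · subst hEq
          have h1 : Function.update g (f^[m] i) true (f^[m] i) = true := by simp
          have h2 : ∃ k, m ≤ k ∧ k < P ∧ f^[k] i = f^[m] i := ⟨m, le_refl m, hmP', rfl⟩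
          rw [h1, (cdec_true_iff _).mpr h2]
          simp
        · rw [Function.update_of_ne hEq]
          have : (∃ k, m + 1 ≤ k ∧ k < P ∧ f^[k] i = e) ↔ (∃ k, m ≤ k ∧ k < P ∧ f^[k] i = e) := by
            constructor
            · rintro ⟨k, h1, h2, h3⟩; exact ⟨k, by omega, h2, h3⟩
            · rintro ⟨k, h1, h2, h3⟩
              refine ⟨k, ?_, h2, h3⟩
              rcases Nat.eq_or_lt_of_le h1 with hEq2 | h
              · exfalso; exact hEq (by rw [← hEq2] at h3; exact h3.symm) |>.elim
              · omega
          rcases Bool.eq_false_or_eq_true (cdec (∃ k, m + 1 ≤ k ∧ k < P ∧ f^[k] i = e)) with hc | hc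
          · rw [hc, (cdec_true_iff _).mpr (this.mp ((cdec_true_iff _).mp hc))]
          · rw [hc, (cdec_false_iff _).mpr (fun hp => ((cdec_false_iff _).mp hc) (this.mpr hp))]
      · push_cast
        omega

theorem wB_period {f : Nat → Nat} {i P : Nat} (hP : 0 < P) (hfix : f^[P] i = i)
    (hge : ∀ k, i ≤ f^[k] i) (hmin : ∀ t, 0 < t → t < P → f^[t] i ≠ i) :
    ∀ (fuel m : Nat) (t : Int), 1 ≤ m → m ≤ P → P - m < fuel →
      wB f i fuel (f^[m] i) t = (i, t + ((P - m : Nat) : Int)) := by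
  intro fuel
  induction fuel with
  | zero => omega
  | succ fuel ih =>
    intro m t hm1 hmP hfuel
    by_cases hmp : m = P
    · subst hmp
      rw [hfix]
      simp [wB]
    · have hlt : i < f^[m] i := Nat.lt_of_le_of_ne (hge m) (fun h => hmin m (by omega) (by omega) h.symm)
      simp only [wB, hlt, if_true]
      rw [show f (f^[m] i) = f^[m + 1] i from (Function.iterate_succ_apply' f m i).symm]
      rw [ih (m + 1) (t + 1) (by omega) (by omega) (by omega)]
      simp only [Prod.mk.injEq]
      exact ⟨by simp, by push_cast; omega⟩

theorem wB_escape {f : Nat → Nat} {i M : Nat} (hM1 : 1 ≤ M) (hMle : f^[M] i ≤ i)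
    (hmin : ∀ m, 1 ≤ m → m < M → i < f^[m] i) :
    ∀ (fuel m : Nat) (t : Int), 1 ≤ m → m ≤ M → M - m < fuel →
      wB f i fuel (f^[m] i) t = (f^[M] i, t + ((M - m : Nat) : Int)) := by
  intro fuel
  induction fuel with
  | zero => omega
  | succ fuel ih =>
    intro m t hm1 hmM hfuel
    by_cases hmp : m = M
    · subst hmp
      have : ¬ i < f^[m] i := by omega
      simp [wB, this]
    · have hlt : i < f^[m] i := hmin m hm1 (by omega)
      simp only [wB, hlt, if_true]
      rw [show f (f^[m] i) = f^[m + 1] i from (Function.iterate_succ_apply' f m i).symm]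
      rw [ih (m + 1) (t + 1) (by omega) (by omega) (by omega)]
      simp only [Prod.mk.injEq]
      exact ⟨by simp, by push_cast; omega⟩

-- ===== per-index step lemmas =====

theorem step_unvisited {f : Nat → Nat} {n : Nat} (hf : ∀ e, e < n → f e < n)
    (hinj : ∀ a, a < n → ∀ b, b < n → f a = f b → a = b)
    {i : Nat} (hi : i < n) (hmin : ∀ k, i ≤ f^[k] i)
    (g : Nat → Bool) (hg : ∀ e, e < n → g e = Vfun f i e) :
    g i = false ∧
    ∃ p : Nat,
      (walkA f (n + 1) g i 0).2 = (p : Int) ∧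
      (∀ e, e < n → (walkA f (n + 1) g i 0).1 e = Vfun f (i + 1) e) ∧
      wB f i (n + 1) (f i) 1 = (i, (p : Int)) := by
  obtain ⟨p0, hp0, hp0n, hp0fix⟩ := exists_period hf hinj hi
  have hex : ∃ t, 0 < t ∧ f^[t] i = i := ⟨p0, hp0, hp0fix⟩
  obtain ⟨hPpos, hPfix⟩ := Nat.find_spec hex
  set P := Nat.find hex with hPdef
  have hPle : P ≤ p0 := Nat.find_le ⟨hp0, hp0fix⟩
  have hPn : P ≤ n := le_trans hPle hp0n
  have hminP : ∀ t, 0 < t → t < P → f^[t] i ≠ i := by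
    intro t ht htP hEq
    exact Nat.find_min hex htP ⟨ht, hEq⟩
  have hgi : g i = false := by
    rw [hg i hi]
    apply (cdec_false_iff _).mpr
    rintro ⟨k, hk⟩
    exact absurd hk (not_lt.mpr (hmin k))
  have horb : ∀ k, 1 ≤ k → k < P → (Function.update g i true) (f^[k] i) = false := by
    intro k h1 h2
    rw [Function.update_of_ne (hminP k h1 h2)]
    rw [hg _ (iter_lt hf hi k)]
    apply (cdec_false_iff _).mpr
    rintro ⟨k', hk'⟩
    rw [← Function.iterate_add_apply] at hk'
    exact absurd hk' (not_lt.mpr (hmin _))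
  have hstep0 : walkA f (n + 1) g i 0 =
      walkA f n (Function.update g i true) (f i) 1 := by
    simp only [walkA, hgi, Bool.false_eq_true, if_false]
    norm_num
  have hf1 : f i = f^[1] i := by simp
  have hrun := walkA_run hf hinj hi hPpos hPfix hminP n 1 (Function.update g i true) 1
    le_rfl hPpos horb (by simp) (by omega)
  refine ⟨hgi, P, ?_, ?_, ?_⟩
  · rw [hstep0, hf1, hrun]
    push_cast
    omega
  · intro e he
    rw [hstep0, hf1, hrun]
    have hiff : (Function.update g i true e ||
        cdec (∃ k, 1 ≤ k ∧ k < P ∧ f^[k] i = e)) = true ↔ Vfun f (i + 1) e = true := by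
      rw [Bool.or_eq_true, cdec_true_iff]
      unfold Vfun
      rw [cdec_true_iff]
      constructor
      · rintro (hup | ⟨k, hk1, hkP, hke⟩)
        · by_cases hEq : e = i
          · exact ⟨0, by simp [hEq]⟩
          · rw [Function.update_of_ne hEq] at hup
            have := (cdec_true_iff _).mp ((hg e he) ▸ hup)
            obtain ⟨k, hk⟩ := this
            exact ⟨k, by omega⟩
        · refine ⟨P - k, ?_⟩
          rw [← hke, ← Function.iterate_add_apply, show P - k + k = P by omega, hPfix]
          omega
      · rintro ⟨k, hk⟩
        rcases Nat.lt_or_ge (f^[k] e) i with hlt | hge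
        · left
          by_cases hEq : e = i
          · subst hEq; simp
          · rw [Function.update_of_ne hEq, hg e he]
            exact (cdec_true_iff _).mpr ⟨k, hlt⟩
        · have hke : f^[k] e = i := by omega
          rcases orbit_back hf hinj hi he hPpos hPfix hke with hEq | ⟨k', hk'1, hk'P, hk'e⟩
          · left; subst hEq; simp
          · right; exact ⟨k', hk'1, hk'P, hk'e⟩
    exact bool_eq_of_iff hiff
  · rw [hf1, wB_period hPpos hPfix hmin hminP (n + 1) 1 1 le_rfl hPpos (by omega)]
    simp only [Prod.mk.injEq]
    exact ⟨by simp, by push_cast; omega⟩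

theorem step_visited {f : Nat → Nat} {n : Nat} (hf : ∀ e, e < n → f e < n)
    (hinj : ∀ a, a < n → ∀ b, b < n → f a = f b → a = b)
    {i : Nat} (hi : i < n) (hvis : ∃ k, f^[k] i < i)
    (g : Nat → Bool) (hg : ∀ e, e < n → g e = Vfun f i e) :
    g i = true ∧ (wB f i (n + 1) (f i) 1).1 ≠ i ∧
    ∀ e, Vfun f (i + 1) e = Vfun f i e := by
  obtain ⟨p0, hp0, hp0n, hp0fix⟩ := exists_period hf hinj hi
  obtain ⟨k, hkl⟩ := hvis
  have hk0 : k ≠ 0 := by rintro rfl; simp at hkl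
  have hk1lt : f^[k % p0] i < i := by rw [← iter_mod hp0 hp0fix]; exact hkl
  have hk10 : k % p0 ≠ 0 := by
    intro h; rw [h] at hk1lt; simp at hk1lt
  have hexM : ∃ m, 1 ≤ m ∧ f^[m] i ≤ i := ⟨k % p0, by omega, le_of_lt hk1lt⟩
  obtain ⟨hM1, hMle⟩ := Nat.find_spec hexM
  set M := Nat.find hexM with hMdef
  have hMk : M ≤ k % p0 := Nat.find_le ⟨by omega, le_of_lt hk1lt⟩
  have hMn : M ≤ n := by have := Nat.mod_lt k hp0; omega
  have hMmin : ∀ m, 1 ≤ m → m < M → i < f^[m] i := by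
    intro m hm1 hmM
    rcases Nat.lt_or_ge i (f^[m] i) with h | h
    · exact h
    · exact absurd ⟨hm1, h⟩ (Nat.find_min hexM hmM)
  refine ⟨?_, ?_, ?_⟩
  · rw [hg i hi]
    exact (cdec_true_iff _).mpr ⟨k, hkl⟩
  · have hf1 : f i = f^[1] i := by simp
    rw [hf1, wB_escape hM1 hMle hMmin (n + 1) 1 1 le_rfl hM1 (by omega)]
    intro hEq
    simp only at hEq
    have hmodM : f^[k % p0] i = f^[(k % p0) % M] i := iter_mod (by omega) hEq _
    by_cases hr0 : (k % p0) % M = 0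
    · rw [hr0] at hmodM; simp at hmodM; omega
    · have : i < f^[(k % p0) % M] i :=
        hMmin _ (by omega) (Nat.mod_lt _ (by omega))
      omega
  · intro e
    have hiff : Vfun f (i + 1) e = true ↔ Vfun f i e = true := by
      unfold Vfun
      rw [cdec_true_iff, cdec_true_iff]
      constructor
      · rintro ⟨j, hj⟩
        rcases Nat.lt_or_ge (f^[j] e) i with hlt | hge
        · exact ⟨j, hlt⟩
        · have hje : f^[j] e = i := by omega
          refine ⟨k + j, ?_⟩
          rw [Function.iterate_add_apply, hje]
          exact hkl
      · rintro ⟨j, hj⟩; exact ⟨j, by omega⟩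
    exact bool_eq_of_iff hiff

-- ===== the abstract folds agree =====

theorem foldAB {f : Nat → Nat} {n : Nat} (hf : ∀ e, e < n → f e < n)
    (hinj : ∀ a, a < n → ∀ b, b < n → f a = f b → a = b) :
    ((List.range n).foldl (stepAabs f (n + 1)) ((fun _ => false), ([] : List Int))).2 =
      (List.range n).foldl (stepBabs f (n + 1)) ([] : List Int) := by
  suffices h : ∀ i, i ≤ n →
      (∀ e, e < n →
        ((List.range i).foldl (stepAabs f (n + 1)) ((fun _ => false), ([] : List Int))).1 e =
          Vfun f i e) ∧
      ((List.range i).foldl (stepAabs f (n + 1)) ((fun _ => false), ([] : List Int))).2 =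
        (List.range i).foldl (stepBabs f (n + 1)) ([] : List Int) by
    exact (h n le_rfl).2
  intro i
  induction i with
  | zero =>
    intro _
    refine ⟨?_, rfl⟩
    intro e he
    symm
    apply (cdec_false_iff _).mpr
    rintro ⟨k, hk⟩
    omega
  | succ i ih =>
    intro hin
    have hi : i < n := by omega
    obtain ⟨ihV, ihL⟩ := ih (by omega)
    rw [List.range_succ, List.foldl_append, List.foldl_append]
    simp only [List.foldl_cons, List.foldl_nil]
    by_cases hvis : ∃ k, f^[k] i < i
    · obtain ⟨hgi, hwB, hVeq⟩ := step_visited hf hinj hi hvis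
        ((List.range i).foldl (stepAabs f (n + 1)) ((fun _ => false), ([] : List Int))).1 ihV
      constructor
      · intro e he
        simp only [stepAabs, hgi, if_true]
        rw [ihV e he, ← hVeq e]
      · simp only [stepAabs, stepBabs, hgi, if_true, if_neg hwB]
        exact ihL
    · have hmin : ∀ k, i ≤ f^[k] i := fun k => not_lt.mp (fun h => hvis ⟨k, h⟩)
      obtain ⟨hgi, p, hlen, hV', hwB⟩ := step_unvisited hf hinj hi hmin
        ((List.range i).foldl (stepAabs f (n + 1)) ((fun _ => false), ([] : List Int))).1 ihV
      constructor
      · intro e he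
        simp only [stepAabs, hgi, Bool.false_eq_true, if_false]
        exact hV' e he
      · simp only [stepAabs, stepBabs, hgi, Bool.false_eq_true, if_false, hwB, if_pos]
        rw [ihL, hlen]

-- ===== concrete-to-abstract couplings =====

theorem runA_walkA {g : List (List Char)} {R C : Nat}
    (hg : g.length = R) (hg0 : (g.headD []).length = C) (good : Good g R C) :
    ∀ (fuel : Nat) (gf : Nat → Bool) (r c k : Nat) (len : Int), r < R → c < C → k < 4 →
      runA g fuel (mk3 R C gf) ((r : Int), (c : Int)) (dirChar k) len =
        (mk3 R C (walkA (fN g R C) fuel gf (encN C r c k) len).1,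
         (walkA (fN g R C) fuel gf (encN C r c k) len).2) := by
  intro fuel
  induction fuel with
  | zero => intro gf r c k len _ _ _; rfl
  | succ fuel ih =>
    intro gf r c k len hr hc hk
    have hgA : visGet (mk3 R C gf) ((r : Int), (c : Int)).1.toNat ((r : Int), (c : Int)).2.toNat
        (dirIdxA (dirChar k)) = gf (encN C r c k) := by
      simp only [Int.toNat_natCast, dirIdxA_dirChar hk]
      exact visGet_mk3 gf hr hc hk
    by_cases hfe : gf (encN C r c k) = true
    · simp only [runA, walkA, hgA, hfe, if_true]
    · have hfe' : gf (encN C r c k) = false := by simp_all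
      simp only [runA, walkA, hgA, hfe', Bool.false_eq_true, if_false]
      rw [show visSet (mk3 R C gf) ((r : Int), (c : Int)).1.toNat ((r : Int), (c : Int)).2.toNat
            (dirIdxA (dirChar k)) = mk3 R C (Function.update gf (encN C r c k) true) by
          simp only [Int.toNat_natCast, dirIdxA_dirChar hk]
          exact visSet_mk3 gf hr hc hk]
      rw [A_next_pos hg hg0 hr hc hk]
      rw [A_next_dir good (npos_lt hr hc).1 (npos_lt hr hc).2 hk]
      rw [fN_enc hr hc hk]
      exact ih _ _ _ _ _ (npos_lt hr hc).1 (npos_lt hr hc).2 (ndir_lt hk)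

-- flattening the triple loop into the single encoded loop

theorem range_mul_flatMap (a b : Nat) :
    List.range (a * b) = (List.range a).flatMap (fun i => (List.range b).map (fun j => i * b + j)) := by
  induction a with
  | zero => simp
  | succ a ih =>
    rw [List.range_succ, List.flatMap_append, ← ih, List.flatMap_singleton]
    rw [show (a + 1) * b = a * b + b by ring, List.range_add]

def Ltri (R C : Nat) : List (Nat × Nat × Nat) :=
  (List.range R).flatMap (fun r => (List.range C).flatMap (fun c =>
    (List.range 4).map (fun k => (r, c, k))))

theorem range_eq_Ltri_map (R C : Nat) :
    List.range (R * C * 4) = (Ltri R C).map (fun t => encN C t.1 t.2.1 t.2.2) := by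
  rw [range_mul_flatMap (R * C) 4, range_mul_flatMap R C]
  unfold Ltri
  simp only [List.flatMap_assoc, List.flatMap_map, List.map_flatMap, List.map_map]
  rfl

theorem mem_Ltri {R C : Nat} {t : Nat × Nat × Nat} (ht : t ∈ Ltri R C) :
    t.1 < R ∧ t.2.1 < C ∧ t.2.2 < 4 := by
  unfold Ltri at ht
  simp only [List.mem_flatMap, List.mem_map, List.mem_range] at ht
  obtain ⟨r, hr, c, hc, k, hk, rfl⟩ := ht
  exact ⟨hr, hc, hk⟩

theorem foldl_rel {α β ι : Type} (P : α → β → Prop) (L : List ι)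
    (fA : α → ι → α) (fB : β → ι → β)
    (hstep : ∀ x ∈ L, ∀ a b, P a b → P (fA a x) (fB b x)) :
    ∀ a b, P a b → P (L.foldl fA a) (L.foldl fB b) := by
  induction L with
  | nil => exact fun a b h => h
  | cons x L ih =>
    intro a b h
    exact ih (fun y hy => hstep y (List.mem_cons_of_mem _ hy))
      (fA a x) (fB b x) (hstep x (List.mem_cons_self) a b h)

theorem chars_eq : ['R', 'D', 'L', 'U'] = (List.range 4).map dirChar := by decide

-- B-side coupling

theorem stepB_fN {g : List (List Char)} {R C e : Nat} (he : e < R * C * 4) :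
    stepB g (R : Int) (C : Int) ((e : Nat) : Int) = ((fN g R C e : Nat) : Int) := by
  obtain ⟨hdec, hr, hc, hk⟩ := enc_decomp (R := R) he
  conv_lhs => rw [hdec]
  rw [B_step hr hc hk]
  conv_rhs => rw [hdec]
  rw [fN_enc hr hc hk]

theorem walkB_wB {g : List (List Char)} {R C : Nat} {i : Nat} :
    ∀ (fuel : Nat) (j : Nat) (t : Int), j < R * C * 4 →
      walkB (stepB g (R : Int) (C : Int)) ((i : Nat) : Int) fuel ((j : Nat) : Int) t =
        ((((wB (fN g R C) i fuel j t).1 : Nat) : Int), (wB (fN g R C) i fuel j t).2) := by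
  intro fuel
  induction fuel with
  | zero => intro j t _; rfl
  | succ fuel ih =>
    intro j t hj
    by_cases hij : i < j
    · have hij' : ((i : Nat) : Int) < ((j : Nat) : Int) := by exact_mod_cast hij
      simp only [walkB, wB, hij, hij', if_true]
      rw [stepB_fN hj]
      exact ih _ _ (fN_lt hj)
    · have hij' : ¬ ((i : Nat) : Int) < ((j : Nat) : Int) := by exact_mod_cast hij
      simp only [walkB, wB, hij, hij', if_false]

-- ===== VERDICT (by name: the statement is the Claim_ definition above) =====
theorem solution_spec : Claim_equal_solution := by
  intro grid _hdom hpre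
  unfold Spec_solution
  obtain ⟨hne, hrows⟩ := hpre
  simp only [solution, solution_alt]
  rw [chars_eq, PySem.List.pyRange_zero_nat ((grid.map (fun s => s.toList)).length),
    PySem.List.pyRange_zero_nat (((grid.map (fun s => s.toList)).headD []).length)]
  simp only [List.foldl_map]
  set g := grid.map (fun s => s.toList) with hgdef
  set R := g.length with hRdef
  set C := (g.headD []).length with hCdefn
  have hhead : g.headD [] = (grid.headD "").toList := by
    cases grid with
    | nil => exact absurd rfl hne
    | cons s t => rfl
  have hCgrid : (grid.headD "").toList.length = C := by rw [hCdefn, hhead]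
  have good : Good g R C := by
    intro r hr c hc
    have hrlen : r < grid.length := by
      have : g.length = grid.length := by simp [hgdef]
      omega
    have hrow : g.getD r [] = (grid.getD r "").toList := by
      rw [hgdef, show ([] : List Char) = "".toList from rfl]
      exact List.getD_map grid "" (fun s => s.toList)
    have hmem : grid.getD r "" ∈ grid := by
      rw [List.getD_eq_getElem grid "" hrlen]
      exact List.getElem_mem hrlen
    obtain ⟨_, hchars⟩ := hrows _ hmem
    have hch := hchars c (by rw [hCgrid]; exact hc)
    simp only [nodeAt, hrow]
    simpa using hch
  -- A side: flatten the triple loop and couple it with the abstract fold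
  have eqA : (List.range R).foldl (fun st (r : Nat) => (List.range C).foldl (fun st (c : Nat) =>
        (List.range 4).foldl (fun st (k : Nat) =>
          if visGet st.1 ((r : Int)).toNat ((c : Int)).toNat (dirIdxA (dirChar k)) = true
          then st
          else ((runA g (R * C * 4 + 1) st.1 ((r : Int), (c : Int)) (dirChar k) 0).1,
            st.2 ++ [(runA g (R * C * 4 + 1) st.1 ((r : Int), (c : Int)) (dirChar k) 0).2])) st) st)
      (List.replicate R (List.replicate C (List.replicate 4 false)), ([] : List Int)) =
      (Ltri R C).foldl
        (fun (st : List (List (List Bool)) × List Int) (t : Nat × Nat × Nat) =>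
          if visGet st.1 ((t.1 : Int)).toNat ((t.2.1 : Int)).toNat (dirIdxA (dirChar t.2.2)) = true
          then st
          else ((runA g (R * C * 4 + 1) st.1 ((t.1 : Int), (t.2.1 : Int)) (dirChar t.2.2) 0).1,
            st.2 ++ [(runA g (R * C * 4 + 1) st.1 ((t.1 : Int), (t.2.1 : Int)) (dirChar t.2.2) 0).2]))
        (List.replicate R (List.replicate C (List.replicate 4 false)), ([] : List Int)) := by
    unfold Ltri
    simp only [List.foldl_flatMap, List.foldl_map]
  have key := foldl_rel
    (fun (a : List (List (List Bool)) × List Int) (b : (Nat → Bool) × List Int) =>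
      a.1 = mk3 R C b.1 ∧ a.2 = b.2)
    (Ltri R C)
    (fun (st : List (List (List Bool)) × List Int) (t : Nat × Nat × Nat) =>
      if visGet st.1 ((t.1 : Int)).toNat ((t.2.1 : Int)).toNat (dirIdxA (dirChar t.2.2)) = true
      then st
      else ((runA g (R * C * 4 + 1) st.1 ((t.1 : Int), (t.2.1 : Int)) (dirChar t.2.2) 0).1,
        st.2 ++ [(runA g (R * C * 4 + 1) st.1 ((t.1 : Int), (t.2.1 : Int)) (dirChar t.2.2) 0).2]))
    (fun (st : (Nat → Bool) × List Int) (t : Nat × Nat × Nat) =>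
      stepAabs (fN g R C) (R * C * 4 + 1) st (encN C t.1 t.2.1 t.2.2))
    ?_
    (List.replicate R (List.replicate C (List.replicate 4 false)), ([] : List Int))
    ((fun _ => false), ([] : List Int))
    ⟨(mk3_false R C).symm, rfl⟩
  · -- use the coupling, then identify both sides with the abstract folds
    rw [eqA, key.2]
    have hA2 : (Ltri R C).foldl
        (fun (st : (Nat → Bool) × List Int) (t : Nat × Nat × Nat) =>
          stepAabs (fN g R C) (R * C * 4 + 1) st (encN C t.1 t.2.1 t.2.2))
        ((fun _ => false), ([] : List Int)) =
        (List.range (R * C * 4)).foldl (stepAabs (fN g R C) (R * C * 4 + 1))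
          ((fun _ => false), ([] : List Int)) := by
      rw [range_eq_Ltri_map, List.foldl_map]
    rw [hA2]
    -- B side: rewrite the concrete fold into the abstract one
    have hRC : (R : Int) * (C : Int) * 4 = ((R * C * 4 : Nat) : Int) := by push_cast; ring
    rw [hRC, PySem.List.pyRange_zero_nat (R * C * 4)]
    simp only [List.foldl_map]
    have hfuel : ((R : Int)).toNat * ((C : Int)).toNat * 4 + 1 = R * C * 4 + 1 := by
      simp
    have hB : ∀ (acc : List Int) (i : Nat), i ∈ List.range (R * C * 4) →
        (fun (acc : List Int) (i : Nat) =>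
          if (walkB (stepB g (R : Int) (C : Int)) ((i : Nat) : Int)
                (((R : Int)).toNat * ((C : Int)).toNat * 4 + 1)
                (stepB g (R : Int) (C : Int) ((i : Nat) : Int)) 1).1 = ((i : Nat) : Int)
          then acc ++ [(walkB (stepB g (R : Int) (C : Int)) ((i : Nat) : Int)
                (((R : Int)).toNat * ((C : Int)).toNat * 4 + 1)
                (stepB g (R : Int) (C : Int) ((i : Nat) : Int)) 1).2]
          else acc) acc i = stepBabs (fN g R C) (R * C * 4 + 1) acc i := by
      intro acc i hi
      rw [List.mem_range] at hi
      simp only [hfuel, stepB_fN hi, walkB_wB _ _ _ (fN_lt hi)]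
      unfold stepBabs
      by_cases hc : (wB (fN g R C) i (R * C * 4 + 1) (fN g R C i) 1).1 = i
      · rw [if_pos hc, if_pos (by exact_mod_cast hc)]
      · rw [if_neg hc, if_neg (by exact_mod_cast hc)]
    have hBfold := foldl_rel (fun (a b : List Int) => a = b) (List.range (R * C * 4))
      (fun (acc : List Int) (i : Nat) =>
          if (walkB (stepB g (R : Int) (C : Int)) ((i : Nat) : Int)
                (((R : Int)).toNat * ((C : Int)).toNat * 4 + 1)
                (stepB g (R : Int) (C : Int) ((i : Nat) : Int)) 1).1 = ((i : Nat) : Int)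
          then acc ++ [(walkB (stepB g (R : Int) (C : Int)) ((i : Nat) : Int)
                (((R : Int)).toNat * ((C : Int)).toNat * 4 + 1)
                (stepB g (R : Int) (C : Int) ((i : Nat) : Int)) 1).2]
          else acc)
      (stepBabs (fN g R C) (R * C * 4 + 1))
      (fun x hx a b hab => by rw [hab, hB b x hx]) ([] : List Int) ([] : List Int) rfl
    rw [hBfold]
    exact congrArg (fun l => PySem.List.sorted l (fun x => x) false)
      (foldAB (fun e he => fN_lt he) (fun a ha b hb h => fN_inj ha hb h))
  · -- pointwise body agreement for the A coupling
    intro t ht a b hP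
    obtain ⟨hr, hc, hk⟩ := mem_Ltri ht
    obtain ⟨ha1, hans⟩ := hP
    dsimp only
    have hcondA : visGet a.1 ((t.1 : Int)).toNat ((t.2.1 : Int)).toNat
        (dirIdxA (dirChar t.2.2)) = b.1 (encN C t.1 t.2.1 t.2.2) := by
      rw [ha1]
      simp only [Int.toNat_natCast, dirIdxA_dirChar hk]
      exact visGet_mk3 b.1 hr hc hk
    unfold stepAabs
    rw [hcondA]
    by_cases hfe : b.1 (encN C t.1 t.2.1 t.2.2) = true
    · rw [if_pos hfe, if_pos hfe]
      exact ⟨ha1, hans⟩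
    · rw [if_neg hfe, if_neg hfe]
      rw [ha1, runA_walkA hRdef.symm hCdefn.symm good (R * C * 4 + 1) b.1 t.1 t.2.1 t.2.2 0 hr hc hk]
      exact ⟨rfl, by rw [hans]⟩
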